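-- pv_equiv track=rewrite | github.com/LeonardoFGaldino/Axxen-Scripts | script retificação mais utilizados com retificador final/remover_erros_37_9_2_dp_chv_cod_part.py | update_totals
-- ===== SOURCE A (Python) =====
-- def update_totals(linhas):
--     count_reg_0 = sum(1 for linha in linhas if linha.startswith('|0'))
--
--     # Atualizar o registro 0990 com a nova contagem de registros que começam com "0"
--     for i, linha in enumerate(linhas):
--         if linha.startswith('|0990|'):
--             campos = linha.split('|')
--             campos[2] = str(count_reg_0)
--             linhas[i] = '|'.join(campos)
--             break
--
--     # Atualizar o registro 9999 com o novo total de linhas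
--     total_linhas = len(linhas)
--     for i, linha in enumerate(linhas):
--         if linha.startswith('|9999|'):
--             campos = linha.split('|')
--             campos[2] = str(total_linhas)
--             linhas[i] = '|'.join(campos)
--             break
--
--     return linhas
-- ===== SOURCE B (Python) =====
-- def update_totals(linhas):
--     # One flag-driven rebuild pass with a partition-based field patch, instead of
--     # A's split/join field lists and two separate search-and-break loops.
--     count_reg_0 = len([linha for linha in linhas if linha.startswith('|0')])
--     total_linhas = len(linhas)
--
--     def patch(linha, prefixo, valor):
--         _, sep, cauda = linha[len(prefixo):].partition('|')
--         return prefixo + str(valor) + sep + cauda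
--
--     out = []
--     falta_0990 = True
--     falta_9999 = True
--     for linha in linhas:
--         if falta_0990 and linha.startswith('|0990|'):
--             out.append(patch(linha, '|0990|', count_reg_0))
--             falta_0990 = False
--         elif falta_9999 and linha.startswith('|9999|'):
--             out.append(patch(linha, '|9999|', total_linhas))
--             falta_9999 = False
--         else:
--             out.append(linha)
--     linhas[:] = out
--     return linhas
-- ===== Notes on version B (the rewrite author's own statement) =====
-- stated objective: alternative
-- what changed: B rebuilds the list in one flag-driven pass that emits each line (patching the first '|0990|' and first '|9999|' line as it goes) instead of A's three scans with index mutation, and edits the field by str.partition on the tail after the record tag instead of A's split('|')/list-assign/join of all fields; the count is a filtered-list length instead of a generator sum.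
import Mathlib
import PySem

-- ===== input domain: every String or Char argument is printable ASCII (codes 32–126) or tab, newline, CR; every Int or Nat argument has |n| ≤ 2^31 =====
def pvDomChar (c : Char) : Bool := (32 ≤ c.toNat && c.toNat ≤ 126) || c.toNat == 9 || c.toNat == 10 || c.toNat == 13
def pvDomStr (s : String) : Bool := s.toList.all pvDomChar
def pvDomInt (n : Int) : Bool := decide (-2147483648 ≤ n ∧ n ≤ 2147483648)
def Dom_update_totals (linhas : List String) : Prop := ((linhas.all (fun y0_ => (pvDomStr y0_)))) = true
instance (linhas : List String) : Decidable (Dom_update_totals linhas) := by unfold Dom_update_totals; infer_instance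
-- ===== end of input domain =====

-- B replaces A's three scans (a count pass and two index-mutating search loops with
-- split('|')/assign/join field edits) by one flag-driven rebuild pass whose field edit
-- uses str.partition on the tail after the record tag; same return value (A mutates its
-- Python argument in place, B performs the same mutation via linhas[:] = out; the
-- equivalence proved is about the return value).


-- ===== PORT A =====
-- A's field edit: campos = linha.split('|'); campos[2] = str(v); '|'.join(campos)
-- (the line is known to start with '|0990|'/'|9999|', so campos has at least 3 fields and
-- Python's campos[2] assignment never raises; List.set is exact there)
def pvFix (linha : String) (v : Int) : String :=
  String.ofList (PySem.Chars.join ['|'] ((PySem.Chars.splitOn linha.toList ['|']).set 2 (PySem.Int.toChars v)))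

-- A's 'for i, linha in enumerate(linhas): if linha.startswith(pfx): … linhas[i] = …; break'
def pvUpdFirst (pfx : String) (v : Int) : List String → List String
  | [] => []
  | l :: ls => if PySem.Str.startswith l pfx then pvFix l v :: ls else l :: pvUpdFirst pfx v ls

def update_totals (linhas : List String) : List String :=
  let count_reg_0 : Int :=
    linhas.foldl (fun acc linha => acc + (if PySem.Str.startswith linha "|0" then 1 else 0)) 0
  let l1 := pvUpdFirst "|0990|" count_reg_0 linhas
  let total_linhas : Int := (l1.length : Int)
  pvUpdFirst "|9999|" total_linhas l1

-- ===== PORT B =====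
-- B's 'resto.partition('|')' (single-character separator; Python returns (s, '', '')
-- when the separator is absent, exactly this recursion)
def pvPartitionBar : List Char → List Char × List Char × List Char
  | [] => ([], [], [])
  | c :: rest =>
      if c = '|' then ([], ['|'], rest)
      else
        let p := pvPartitionBar rest
        (c :: p.1, p.2.1, p.2.2)

-- B's patch: '_, sep, cauda = linha[len(prefixo):].partition('|'); prefixo + str(valor) + sep + cauda'
-- (linha[len(prefixo):] is List.drop, exact for a nonnegative literal prefix length)
def pvPatch (pfx : List Char) (v : Int) (linha : String) : String :=
  let p := pvPartitionBar (linha.toList.drop pfx.length)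
  String.ofList (pfx ++ PySem.Int.toChars v ++ p.2.1 ++ p.2.2)

def update_totals_alt (linhas : List String) : List String :=
  let count_reg_0 : Int := ((linhas.filter (fun l => PySem.Str.startswith l "|0")).length : Int)
  let total_linhas : Int := (linhas.length : Int)
  (linhas.foldl
     (fun (st : List String × Bool × Bool) linha =>
       match st with
       | (out, falta_0990, falta_9999) =>
         if falta_0990 && PySem.Str.startswith linha "|0990|" then
           (out ++ [pvPatch "|0990|".toList count_reg_0 linha], false, falta_9999)
         else if falta_9999 && PySem.Str.startswith linha "|9999|" then
           (out ++ [pvPatch "|9999|".toList total_linhas linha], falta_0990, false)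
         else (out ++ [linha], falta_0990, falta_9999))
     ([], true, true)).1

-- ===== PRECONDITION & SPEC =====
def Spec_update_totals (linhas : List String) (out : List String) : Prop := out = update_totals_alt linhas
instance (linhas : List String) (out : List String) : Decidable (Spec_update_totals linhas out) := by unfold Spec_update_totals; infer_instance

-- ===== CLAIM (what is proved, stated in full; the proofs are below) =====
def Claim_equal_update_totals : Prop := ∀ (linhas : List String), Dom_update_totals linhas → Spec_update_totals linhas (update_totals linhas)

-- ===== LEMMAS AND PROOFS =====

-- step equations for PySem.Chars.splitOn.go (definitional)
theorem pv_go_zero (sep l cur : List Char) (acc : List (List Char)) :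
    PySem.Chars.splitOn.go sep 0 l cur acc = ((cur.reverse ++ l) :: acc).reverse := rfl

theorem pv_go_nil (sep : List Char) (f : Nat) (cur : List Char) (acc : List (List Char)) :
    PySem.Chars.splitOn.go sep (f + 1) [] cur acc = (cur.reverse :: acc).reverse := rfl

theorem pv_go_succ (sep : List Char) (f : Nat) (c : Char) (rest cur : List Char) (acc : List (List Char)) :
    PySem.Chars.splitOn.go sep (f + 1) (c :: rest) cur acc =
      if sep.isPrefixOf (c :: rest) then
        PySem.Chars.splitOn.go sep f (List.drop sep.length (c :: rest)) [] (cur.reverse :: acc)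
      else PySem.Chars.splitOn.go sep f rest (c :: cur) acc := rfl

-- go's accumulator only collects finished pieces in front
theorem pv_go_acc (sep : List Char) : ∀ (f : Nat) (l cur : List Char) (acc : List (List Char)),
    PySem.Chars.splitOn.go sep f l cur acc = acc.reverse ++ PySem.Chars.splitOn.go sep f l cur [] := by
  intro f
  induction f with
  | zero => intro l cur acc; rw [pv_go_zero, pv_go_zero]; simp
  | succ f ih =>
    intro l cur acc
    cases l with
    | nil => rw [pv_go_nil, pv_go_nil]; simp
    | cons c rest =>
      rw [pv_go_succ, pv_go_succ]
      split_ifs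
      · rw [ih _ [] (cur.reverse :: acc), ih _ [] [cur.reverse]]; simp
      · exact ih rest (c :: cur) acc

-- go with empty accumulator always produces at least one piece
theorem pv_go_ne (sep : List Char) : ∀ (f : Nat) (l cur : List Char),
    ∃ x xs, PySem.Chars.splitOn.go sep f l cur [] = x :: xs := by
  intro f
  induction f with
  | zero => intro l cur; rw [pv_go_zero]; exact ⟨_, _, rfl⟩
  | succ f ih =>
    intro l cur
    cases l with
    | nil => rw [pv_go_nil]; exact ⟨_, _, rfl⟩
    | cons c rest =>
      rw [pv_go_succ]
      split_ifs
      · rw [pv_go_acc sep f _ [] [cur.reverse]]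
        exact ⟨_, _, rfl⟩
      · exact ih rest (c :: cur)

theorem pv_splitOn_ne (l : List Char) : ∃ x xs, PySem.Chars.splitOn l ['|'] = x :: xs := by
  unfold PySem.Chars.splitOn
  exact pv_go_ne ['|'] (l.length + 1) l []

-- join over cons-cons (definitional via intercalate/intersperse)
theorem pv_join_cons (s a b : List Char) (t : List (List Char)) :
    PySem.Chars.join s (a :: b :: t) = a ++ s ++ PySem.Chars.join s (b :: t) := by
  simp [PySem.Chars.join, List.intercalate, List.intersperse]

-- split/join round trip at the go level
theorem pv_go_join : ∀ (f : Nat) (l cur : List Char), l.length < f →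
    PySem.Chars.join ['|'] (PySem.Chars.splitOn.go ['|'] f l cur []) = cur.reverse ++ l := by
  intro f
  induction f with
  | zero => intro l cur h; omega
  | succ f ih =>
    intro l cur h
    cases l with
    | nil => rw [pv_go_nil]; simp
    | cons c rest =>
      rw [pv_go_succ]
      split_ifs with hp
      · have hc : c = '|' := Eq.symm (by simpa [List.isPrefixOf] using hp)
        rw [show List.drop (['|'] : List Char).length (c :: rest) = rest by simp]
        rw [pv_go_acc ['|'] f rest [] [cur.reverse]]
        obtain ⟨x, xs, hx⟩ := pv_go_ne ['|'] f rest []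
        rw [hx]
        have hj := ih rest [] (by simpa using h)
        rw [hx] at hj
        simp only [List.reverse_nil, List.nil_append] at hj
        simp only [List.reverse_cons, List.reverse_nil, List.nil_append, List.singleton_append]
        rw [pv_join_cons, hj, hc]
        simp
      · have := ih rest (c :: cur) (by simpa using h)
        rw [this]; simp

-- joining with the first piece replaced = value ++ partition remainder
theorem pv_go_set : ∀ (f : Nat) (l cur w : List Char), l.length < f →
    PySem.Chars.join ['|'] ((PySem.Chars.splitOn.go ['|'] f l cur []).set 0 w) =
      w ++ (pvPartitionBar l).2.1 ++ (pvPartitionBar l).2.2 := by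
  intro f
  induction f with
  | zero => intro l cur w h; omega
  | succ f ih =>
    intro l cur w h
    cases l with
    | nil => rw [pv_go_nil]; simp [pvPartitionBar]
    | cons c rest =>
      rw [pv_go_succ]
      split_ifs with hp
      · have hc : c = '|' := Eq.symm (by simpa [List.isPrefixOf] using hp)
        rw [show List.drop (['|'] : List Char).length (c :: rest) = rest by simp]
        rw [pv_go_acc ['|'] f rest [] [cur.reverse]]
        obtain ⟨x, xs, hx⟩ := pv_go_ne ['|'] f rest []
        rw [hx]
        simp only [List.reverse_cons, List.reverse_nil, List.nil_append, List.singleton_append]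
        rw [show ((cur.reverse :: x :: xs).set 0 w : List (List Char)) = w :: x :: xs from rfl]
        have hj := pv_go_join f rest [] (by simpa using h)
        rw [hx] at hj
        simp only [List.reverse_nil, List.nil_append] at hj
        rw [pv_join_cons, hj]
        simp [pvPartitionBar, hc]
      · have hc : ¬ c = '|' := by
          intro hc; exact hp (by simp [List.isPrefixOf, hc])
        rw [ih rest (c :: cur) w (by simpa using h)]
        simp [pvPartitionBar, hc]

theorem pv_join_set (rest w : List Char) :
    PySem.Chars.join ['|'] ((PySem.Chars.splitOn rest ['|']).set 0 w) =
      w ++ (pvPartitionBar rest).2.1 ++ (pvPartitionBar rest).2.2 := by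
  unfold PySem.Chars.splitOn
  exact pv_go_set (rest.length + 1) rest [] w (by omega)

-- splitting on '|' after a '|0990|' prefix: the first two pieces are [] and "0990"
theorem pv_splitOn_0990 (rest : List Char) :
    PySem.Chars.splitOn ('|' :: '0' :: '9' :: '9' :: '0' :: '|' :: rest) ['|'] =
      [] :: ['0', '9', '9', '0'] :: PySem.Chars.splitOn rest ['|'] := by
  unfold PySem.Chars.splitOn
  have hlen : ('|' :: '0' :: '9' :: '9' :: '0' :: '|' :: rest).length + 1 = rest.length + 6 + 1 := by
    simp
  rw [hlen, pv_go_succ, if_pos (by simp [List.isPrefixOf]),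
    (by omega : rest.length + 6 = rest.length + 5 + 1)]
  simp only [List.length_cons, List.length_nil, List.drop_succ_cons, List.drop_zero, List.reverse_nil]
  rw [pv_go_succ, if_neg (by simp [List.isPrefixOf]),
    (by omega : rest.length + 5 = rest.length + 4 + 1), pv_go_succ, if_neg (by simp [List.isPrefixOf]),
    (by omega : rest.length + 4 = rest.length + 3 + 1), pv_go_succ, if_neg (by simp [List.isPrefixOf]),
    (by omega : rest.length + 3 = rest.length + 2 + 1), pv_go_succ, if_neg (by simp [List.isPrefixOf]),
    (by omega : rest.length + 2 = rest.length + 1 + 1), pv_go_succ, if_pos (by simp [List.isPrefixOf])]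
  simp only [List.length_cons, List.length_nil, List.drop_succ_cons, List.drop_zero]
  rw [pv_go_acc]
  simp

-- same for a '|9999|' prefix
theorem pv_splitOn_9999 (rest : List Char) :
    PySem.Chars.splitOn ('|' :: '9' :: '9' :: '9' :: '9' :: '|' :: rest) ['|'] =
      [] :: ['9', '9', '9', '9'] :: PySem.Chars.splitOn rest ['|'] := by
  unfold PySem.Chars.splitOn
  have hlen : ('|' :: '9' :: '9' :: '9' :: '9' :: '|' :: rest).length + 1 = rest.length + 6 + 1 := by
    simp
  rw [hlen, pv_go_succ, if_pos (by simp [List.isPrefixOf]),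
    (by omega : rest.length + 6 = rest.length + 5 + 1)]
  simp only [List.length_cons, List.length_nil, List.drop_succ_cons, List.drop_zero, List.reverse_nil]
  rw [pv_go_succ, if_neg (by simp [List.isPrefixOf]),
    (by omega : rest.length + 5 = rest.length + 4 + 1), pv_go_succ, if_neg (by simp [List.isPrefixOf]),
    (by omega : rest.length + 4 = rest.length + 3 + 1), pv_go_succ, if_neg (by simp [List.isPrefixOf]),
    (by omega : rest.length + 3 = rest.length + 2 + 1), pv_go_succ, if_neg (by simp [List.isPrefixOf]),
    (by omega : rest.length + 2 = rest.length + 1 + 1), pv_go_succ, if_pos (by simp [List.isPrefixOf])]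
  simp only [List.length_cons, List.length_nil, List.drop_succ_cons, List.drop_zero]
  rw [pv_go_acc]
  simp

theorem pv_interc3 (s a b c : List Char) (l : List (List Char)) :
    List.intercalate s (a :: b :: c :: l) = a ++ s ++ b ++ s ++ List.intercalate s (c :: l) := by
  simp [List.intercalate, List.intersperse]

-- fixing the third field of a '|0990|' line keeps its '|0990|' prefix
theorem pv_fix_keeps_0990 (l : String) (v : Int)
    (h : PySem.Str.startswith l "|0990|" = true) :
    PySem.Str.startswith (pvFix l v) "|0990|" = true := by
  rw [PySem.Str.startswith_eq, PySem.Chars.startswith_iff] at h ⊢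
  obtain ⟨rest, hrest⟩ := h
  unfold pvFix
  rw [show ("|0990|".toList : List Char) = ['|','0','9','9','0','|'] from rfl] at hrest ⊢
  rw [show (String.ofList (PySem.Chars.join ['|'] ((PySem.Chars.splitOn l.toList ['|']).set 2 (PySem.Int.toChars v)))).toList
      = PySem.Chars.join ['|'] ((PySem.Chars.splitOn l.toList ['|']).set 2 (PySem.Int.toChars v)) by simp]
  rw [← hrest, show (['|','0','9','9','0','|'] ++ rest : List Char) = '|'::'0'::'9'::'9'::'0'::'|'::rest from rfl,
    pv_splitOn_0990]
  obtain ⟨x, xs, hx⟩ := pv_splitOn_ne rest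
  rw [hx]
  show ['|','0','9','9','0','|'] <+: List.intercalate ['|'] ([] :: ['0','9','9','0'] :: PySem.Int.toChars v :: xs)
  rw [pv_interc3]
  exact ⟨List.intercalate ['|'] (PySem.Int.toChars v :: xs), by simp⟩

-- a line cannot start with both '|0990|' and '|9999|'
theorem pv_excl (l : String) (h : PySem.Str.startswith l "|0990|" = true) :
    PySem.Str.startswith l "|9999|" = false := by
  by_contra hc
  rw [Bool.not_eq_false, PySem.Str.startswith_eq, PySem.Chars.startswith_iff] at hc
  rw [PySem.Str.startswith_eq, PySem.Chars.startswith_iff] at h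
  rcases List.prefix_or_prefix_of_prefix h hc with h1 | h1
  · exact absurd (h1.eq_of_length (by decide)) (by decide)
  · exact absurd (h1.eq_of_length (by decide)) (by decide)

theorem pv_excl' (l : String) (h : PySem.Str.startswith l "|9999|" = true) :
    PySem.Str.startswith l "|0990|" = false := by
  by_contra hc
  rw [Bool.not_eq_false] at hc
  rw [pv_excl l hc] at h
  exact Bool.false_ne_true h

-- B's partition-based patch equals A's split/assign/join field edit on a '|0990|' line
theorem pv_patch_0990 (l : String) (v : Int)
    (h : PySem.Str.startswith l "|0990|" = true) :
    pvPatch "|0990|".toList v l = pvFix l v := by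
  rw [PySem.Str.startswith_eq, PySem.Chars.startswith_iff] at h
  obtain ⟨rest, hrest⟩ := h
  rw [show ("|0990|".toList : List Char) = ['|','0','9','9','0','|'] from rfl] at hrest
  unfold pvPatch pvFix
  rw [← hrest]
  rw [show (['|','0','9','9','0','|'] ++ rest).drop (("|0990|".toList : List Char)).length = rest by simp]
  rw [show (['|','0','9','9','0','|'] ++ rest : List Char) = '|'::'0'::'9'::'9'::'0'::'|'::rest from rfl,
    pv_splitOn_0990]
  rw [show ∀ (ps : List (List Char)) (w : List Char),
        (([] : List Char) :: ['0','9','9','0'] :: ps).set 2 w = [] :: ['0','9','9','0'] :: ps.set 0 w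
      from fun ps w => rfl]
  obtain ⟨x, xs, hx⟩ := pv_splitOn_ne rest
  rw [hx, show ((x :: xs).set 0 (PySem.Int.toChars v)) = PySem.Int.toChars v :: xs from rfl,
    pv_join_cons, pv_join_cons]
  have hs := pv_join_set rest (PySem.Int.toChars v)
  rw [hx, show ((x :: xs).set 0 (PySem.Int.toChars v)) = PySem.Int.toChars v :: xs from rfl] at hs
  rw [hs]
  simp

theorem pv_patch_9999 (l : String) (v : Int)
    (h : PySem.Str.startswith l "|9999|" = true) :
    pvPatch "|9999|".toList v l = pvFix l v := by
  rw [PySem.Str.startswith_eq, PySem.Chars.startswith_iff] at h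
  obtain ⟨rest, hrest⟩ := h
  rw [show ("|9999|".toList : List Char) = ['|','9','9','9','9','|'] from rfl] at hrest
  unfold pvPatch pvFix
  rw [← hrest]
  rw [show (['|','9','9','9','9','|'] ++ rest).drop (("|9999|".toList : List Char)).length = rest by simp]
  rw [show (['|','9','9','9','9','|'] ++ rest : List Char) = '|'::'9'::'9'::'9'::'9'::'|'::rest from rfl,
    pv_splitOn_9999]
  rw [show ∀ (ps : List (List Char)) (w : List Char),
        (([] : List Char) :: ['9','9','9','9'] :: ps).set 2 w = [] :: ['9','9','9','9'] :: ps.set 0 w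
      from fun ps w => rfl]
  obtain ⟨x, xs, hx⟩ := pv_splitOn_ne rest
  rw [hx, show ((x :: xs).set 0 (PySem.Int.toChars v)) = PySem.Int.toChars v :: xs from rfl,
    pv_join_cons, pv_join_cons]
  have hs := pv_join_set rest (PySem.Int.toChars v)
  rw [hx, show ((x :: xs).set 0 (PySem.Int.toChars v)) = PySem.Int.toChars v :: xs from rfl] at hs
  rw [hs]
  simp

-- pvUpdFirst preserves length
theorem pv_updFirst_len (pfx : String) (v : Int) : ∀ (xs : List String),
    (pvUpdFirst pfx v xs).length = xs.length := by
  intro xs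
  induction xs with
  | nil => rfl
  | cons x xs ih =>
    unfold pvUpdFirst
    split_ifs <;> simp [ih]

-- B's loop body as a structural recursion on the remaining lines
def pvReb (c t : Int) : List String → Bool → Bool → List String
  | [], _, _ => []
  | x :: xs, f0, f9 =>
      if f0 && PySem.Str.startswith x "|0990|" then
        pvPatch "|0990|".toList c x :: pvReb c t xs false f9
      else if f9 && PySem.Str.startswith x "|9999|" then
        pvPatch "|9999|".toList t x :: pvReb c t xs f0 false
      else x :: pvReb c t xs f0 f9

-- the foldl over (out, flags) appends pvReb to the accumulator
theorem pv_fold_reb (c t : Int) : ∀ (xs : List String) (out : List String) (f0 f9 : Bool),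
    (xs.foldl
      (fun (st : List String × Bool × Bool) linha =>
        match st with
        | (out, falta_0990, falta_9999) =>
          if falta_0990 && PySem.Str.startswith linha "|0990|" then
            (out ++ [pvPatch "|0990|".toList c linha], false, falta_9999)
          else if falta_9999 && PySem.Str.startswith linha "|9999|" then
            (out ++ [pvPatch "|9999|".toList t linha], falta_0990, false)
          else (out ++ [linha], falta_0990, falta_9999))
      (out, f0, f9)).1 = out ++ pvReb c t xs f0 f9 := by
  intro xs
  induction xs with
  | nil => intro out f0 f9; simp [pvReb]
  | cons x xs ih =>
    intro out f0 f9
    rw [List.foldl_cons]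
    unfold pvReb
    split_ifs with h1 h2
    · simp only [h1, if_true]; rw [ih]; simp
    · simp only [h1, if_false, Bool.false_eq_true, h2, if_true]; rw [ih]; simp
    · simp only [h1, if_false, Bool.false_eq_true, h2]; rw [ih]; simp

-- conditional application of A's first-match update
def pvU (pfx : String) (v : Int) (b : Bool) (xs : List String) : List String :=
  if b then pvUpdFirst pfx v xs else xs

-- B's one rebuild pass equals A's two sequential first-match updates
theorem pv_reb_eq (c t : Int) : ∀ (xs : List String) (f0 f9 : Bool),
    pvReb c t xs f0 f9 = pvU "|9999|" t f9 (pvU "|0990|" c f0 xs) := by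
  intro xs
  induction xs with
  | nil => intro f0 f9; cases f0 <;> cases f9 <;> simp [pvReb, pvU, pvUpdFirst]
  | cons x xs ih =>
    intro f0 f9
    unfold pvReb
    split_ifs with h1 h2
    · -- first '|0990|' line, patched with the count
      obtain ⟨hf0, hm0⟩ := Bool.and_eq_true_iff.mp h1
      have hm0c : PySem.Chars.startswith x.toList ['|','0','9','9','0','|'] = true := by
        simpa using hm0
      have hnot9c : PySem.Chars.startswith (pvFix x c).toList ['|','9','9','9','9','|'] = false := by
        simpa using pv_excl _ (pv_fix_keeps_0990 x c hm0)
      rw [pv_patch_0990 x c hm0, ih false f9, hf0]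
      cases f9 <;> simp [pvU, pvUpdFirst, hm0c, hnot9c]
    · -- first '|9999|' line, patched with the total
      obtain ⟨hf9, hm9⟩ := Bool.and_eq_true_iff.mp h2
      have hm9c : PySem.Chars.startswith x.toList ['|','9','9','9','9','|'] = true := by
        simpa using hm9
      have hnot0c : PySem.Chars.startswith x.toList ['|','0','9','9','0','|'] = false := by
        simpa using pv_excl' x hm9
      rw [pv_patch_9999 x t hm9, ih f0 false, hf9]
      cases f0 <;> simp [pvU, pvUpdFirst, hm9c, hnot0c]
    · -- untouched line: both flags pass through
      rw [ih f0 f9]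
      have h1' : f0 = false ∨ PySem.Str.startswith x "|0990|" = false := by
        cases f0 <;> cases hx : PySem.Str.startswith x "|0990|" <;> simp_all
      have h2' : f9 = false ∨ PySem.Str.startswith x "|9999|" = false := by
        cases f9 <;> cases hx : PySem.Str.startswith x "|9999|" <;> simp_all
      have hU0 : pvU "|0990|" c f0 (x :: xs) = x :: pvU "|0990|" c f0 xs := by
        rcases h1' with hf0 | hm0f
        · rw [hf0]; simp [pvU]
        · have hm0fc : PySem.Chars.startswith x.toList ['|','0','9','9','0','|'] = false := by
            simpa using hm0f
          cases f0 <;> simp [pvU, pvUpdFirst, hm0fc]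
      rw [hU0]
      rcases h2' with hf9 | hm9f
      · rw [hf9]; simp [pvU]
      · have hm9fc : PySem.Chars.startswith x.toList ['|','9','9','9','9','|'] = false := by
          simpa using hm9f
        cases f9 <;> simp [pvU, pvUpdFirst, hm9fc]

-- A's count fold = length of the filtered list
theorem pv_count_eq (xs : List String) :
    xs.foldl (fun acc linha => acc + (if PySem.Str.startswith linha "|0" then 1 else 0)) 0
      = ((xs.filter (fun l => PySem.Str.startswith l "|0")).length : Int) := by
  have h : xs.foldl (fun acc linha => acc + (if PySem.Str.startswith linha "|0" then 1 else 0)) 0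
      = (0 : Int) + (xs.countP (fun l => PySem.Str.startswith l "|0") : Int) := by
    rw [show (fun (acc : Int) linha => acc + (if PySem.Str.startswith linha "|0" then (1:Int) else 0))
        = fun acc linha => if PySem.Str.startswith linha "|0" then acc + 1 else acc from
        funext fun a => funext fun l => by split <;> simp]
    exact PySem.List.foldl_count_if _ xs 0
  rw [h, List.countP_eq_length_filter]
  simp

-- ===== VERDICT (by name: the statement is the Claim_ definition above) =====
theorem update_totals_spec : Claim_equal_update_totals := by
  intro xs _
  show update_totals xs = update_totals_alt xs
  unfold update_totals update_totals_alt
  simp only [pv_fold_reb, pv_reb_eq, pv_count_eq, pv_updFirst_len, List.nil_append]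
  simp [pvU]
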